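-- pv_equiv track=rewrite | github.com/pocotu/training | problems/contests/codeforces/div2/round_915/problem_c/solution.py | construct_intermediate
-- ===== SOURCE A (Python) =====
-- def construct_intermediate(n, k):
--     """Construct permutation for intermediate k values."""
--     # Proven pattern for contest
--     if k == 0:
--         return list(range(1, n + 1))
--
--     # For k > 0, we build systematically
--     # This is a simplified version for contest submission
--     result = list(range(1, n + 1))
--
--     # Adjust last few elements to create operations
--     ops_needed = k
--     for i in range(n - 1, -1, -1):
--         if ops_needed <= 0:
--             break
--
--         max_here = n - i
--         if ops_needed >= max_here:
--             result[i] = n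
--             ops_needed -= max_here
--         else:
--             result[i] = i + 1 + ops_needed
--             ops_needed = 0
--
--     return result
-- ===== SOURCE B (Python) =====
-- def construct_intermediate(n, k):
--     """Construct permutation for intermediate k values (closed-form fill)."""
--     # m = largest m in [0, max(n,0)] with m*(m+1)//2 <= k, by binary search
--     lo, hi = 0, max(n, 0)
--     while lo < hi:
--         mid = (lo + hi + 1) // 2
--         if mid * (mid + 1) // 2 <= k:
--             lo = mid
--         else:
--             hi = mid - 1
--     m = lo
--     r = k - m * (m + 1) // 2
--     return [n if i >= n - m else (i + 1 + r if i == n - m - 1 and r > 0 else i + 1)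
--             for i in range(n)]
-- ===== Notes on version B (the rewrite author's own statement) =====
-- stated objective: alternative
-- what changed: Replaces the backward subtract-and-branch loop by a closed-form fill: the number m of full triangular steps is found by binary search on m(m+1)/2 <= k (capped at n), and the list is built in one comprehension from m and the remainder r; the k==0 guard disappears.
import Mathlib
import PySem

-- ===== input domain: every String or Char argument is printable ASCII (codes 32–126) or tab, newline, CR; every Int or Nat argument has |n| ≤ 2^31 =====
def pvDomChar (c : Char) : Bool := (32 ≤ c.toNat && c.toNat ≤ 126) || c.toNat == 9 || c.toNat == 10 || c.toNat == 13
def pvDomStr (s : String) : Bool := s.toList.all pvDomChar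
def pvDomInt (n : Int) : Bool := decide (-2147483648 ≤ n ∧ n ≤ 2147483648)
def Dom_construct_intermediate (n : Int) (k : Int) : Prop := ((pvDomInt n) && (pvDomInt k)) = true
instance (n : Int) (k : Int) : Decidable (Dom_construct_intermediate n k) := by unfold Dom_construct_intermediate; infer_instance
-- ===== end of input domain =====

-- B replaces A's backward subtract-and-branch loop by a binary search for the number of
-- full steps plus a closed-form one-pass fill (alternative decomposition, same cost).

-- ===== PORT A =====
-- the 'for i in range(n-1,-1,-1)' loop with its break, as a downward recursion on i
def pvAdjust (n : Int) (res : List Int) (ops : Int) (i : Int) : List Int :=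
  if _h : i < 0 then res
  else if ops ≤ 0 then res
  else
    let maxHere := n - i
    if maxHere ≤ ops then
      pvAdjust n (res.set i.toNat n) (ops - maxHere) (i - 1)
    else
      res.set i.toNat (i + 1 + ops)
termination_by (i + 1).toNat
decreasing_by omega

def construct_intermediate (n : Int) (k : Int) : List Int :=
  if k = 0 then PySem.List.pyRange 1 (n + 1) 1
  else pvAdjust n (PySem.List.pyRange 1 (n + 1) 1) k (n - 1)

-- ===== PORT B =====
-- 'while lo < hi: mid = (lo+hi+1)//2; …' from Source B
def pvBSearch (k : Int) (lo hi : Int) : Int :=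
  if _h : lo < hi then
    let mid := PySem.Int.floordiv (lo + hi + 1) 2
    if PySem.Int.floordiv (mid * (mid + 1)) 2 ≤ k then pvBSearch k mid hi
    else pvBSearch k lo (mid - 1)
  else lo
termination_by (hi - lo).toNat
decreasing_by
  · have := PySem.Int.floordiv_two_mid_bounds (lo := lo + 1) (hi := hi) (by omega)
    have e : lo + 1 + hi = lo + hi + 1 := by ring
    rw [e] at this
    omega
  · have := PySem.Int.floordiv_two_mid_bounds (lo := lo + 1) (hi := hi) (by omega)
    have e : lo + 1 + hi = lo + hi + 1 := by ring
    rw [e] at this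
    omega

def construct_intermediate_alt (n : Int) (k : Int) : List Int :=
  let m := pvBSearch k 0 (max n 0)
  let r := k - PySem.Int.floordiv (m * (m + 1)) 2
  (PySem.List.pyRange 0 n 1).map (fun i =>
    if n - m ≤ i then n
    else if i = n - m - 1 ∧ 0 < r then i + 1 + r
    else i + 1)

-- ===== PRECONDITION & SPEC =====
def Spec_construct_intermediate (n : Int) (k : Int) (out : List Int) : Prop := out = construct_intermediate_alt n k
instance (n : Int) (k : Int) (out : List Int) : Decidable (Spec_construct_intermediate n k out) := by unfold Spec_construct_intermediate; infer_instance

-- ===== CLAIM (what is proved, stated in full; the proofs are below) =====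
def Claim_equal_construct_intermediate : Prop := ∀ (n : Int) (k : Int), Dom_construct_intermediate n k → Spec_construct_intermediate n k (construct_intermediate n k)

-- ===== LEMMAS AND PROOFS =====

-- triangular numbers, recursively (proof-only helper)
def pvTri : Nat → Int
  | 0 => 0
  | t + 1 => pvTri t + (t + 1)

theorem pvTri_twice (t : Nat) : 2 * pvTri t = (t : Int) * (t + 1) := by
  induction t with
  | zero => simp [pvTri]
  | succ t ih => simp only [pvTri]; push_cast; ring_nf; ring_nf at ih; omega

theorem pvTri_mono {t s : Nat} (h : t ≤ s) : pvTri t ≤ pvTri s := by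
  induction s with
  | zero => simp_all
  | succ s ih =>
    rcases Nat.lt_or_ge t (s+1) with h' | h'
    · have := ih (by omega)
      simp only [pvTri]; omega
    · have : t = s + 1 := by omega
      subst this; exact le_refl _

-- binary-search correctness
theorem pvHalf_le (x k : Int) (hev : Even x) : PySem.Int.floordiv x 2 ≤ k ↔ x ≤ 2 * k := by
  obtain ⟨y, hy⟩ := hev
  subst hy
  rw [PySem.Int.floordiv_eq_ediv_of_pos (by norm_num)]
  omega

theorem pvBSearch_spec (k : Int) : ∀ N : Nat, ∀ lo hi : Int, (hi - lo).toNat = N →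
    lo ≤ hi → lo * (lo + 1) ≤ 2 * k →
    lo ≤ pvBSearch k lo hi ∧ pvBSearch k lo hi ≤ hi ∧
    pvBSearch k lo hi * (pvBSearch k lo hi + 1) ≤ 2 * k ∧
    (pvBSearch k lo hi + 1 ≤ hi → ¬ ((pvBSearch k lo hi + 1) * (pvBSearch k lo hi + 2) ≤ 2 * k)) := by
  intro N
  induction N using Nat.strong_induction_on with
  | _ N ih =>
    intro lo hi hN hlohi hPlo
    rw [pvBSearch]
    by_cases hlt : lo < hi
    · simp only [dif_pos hlt]
      have hmidb := PySem.Int.floordiv_two_mid_bounds (lo := lo + 1) (hi := hi) (by omega)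
      have e : lo + 1 + hi = lo + hi + 1 := by ring
      rw [e] at hmidb
      set mid := PySem.Int.floordiv (lo + hi + 1) 2 with hmid
      have hev : Even (mid * (mid + 1)) := Int.even_mul_succ_self mid
      by_cases hc : PySem.Int.floordiv (mid * (mid + 1)) 2 ≤ k
      · rw [if_pos hc]
        have hPmid : mid * (mid + 1) ≤ 2 * k := (pvHalf_le _ _ hev).mp hc
        have hrec := ih (hi - mid).toNat (by omega) mid hi rfl (by omega) hPmid
        exact ⟨by omega, hrec.2.1, hrec.2.2.1, hrec.2.2.2⟩
      · rw [if_neg hc]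
        have hPmid : ¬ (mid * (mid + 1) ≤ 2 * k) := fun h => hc ((pvHalf_le _ _ hev).mpr h)
        have hrec := ih (mid - 1 - lo).toNat (by omega) lo (mid - 1) rfl (by omega) hPlo
        refine ⟨hrec.1, by omega, hrec.2.2.1, ?_⟩
        intro _
        rcases lt_or_ge (pvBSearch k lo (mid - 1) + 1) mid with hlt2 | hge
        · exact hrec.2.2.2 (by omega)
        · have heq : pvBSearch k lo (mid - 1) + 1 = mid := by omega
          have heq2 : pvBSearch k lo (mid - 1) + 2 = mid + 1 := by omega
          rw [heq, heq2]
          exact hPmid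
    · simp only [dif_neg hlt]
      exact ⟨le_refl _, hlohi, hPlo, fun hcontr => absurd hcontr (by omega)⟩

theorem set_map_range (N : Nat) (f : Nat → Int) (p : Nat) (v : Int) (_hp : p < N) :
    ((List.range N).map f).set p v = (List.range N).map (fun j => if j = p then v else f j) := by
  apply List.ext_getElem
  · simp
  · intro i h1 h2
    simp only [List.getElem_set, List.getElem_map, List.getElem_range]
    split_ifs with h3 h4 h4
    · rfl
    · exact absurd h3.symm h4
    · exact absurd h4.symm h3
    · rfl

theorem pvReach (n k : Int) (m : Int) (hm0 : 0 ≤ m) (hmn : m ≤ max n 0)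
    (hP : 1 ≤ m → m * (m + 1) ≤ 2 * k) :
    ∀ t : Nat, (t : Int) ≤ m →
      pvAdjust n ((List.range n.toNat).map (fun (j : Nat) => (1 : Int) + (j : Int))) k (n - 1)
        = pvAdjust n ((List.range n.toNat).map (fun (j : Nat) => if n - (t : Int) ≤ (j : Int) then n else 1 + (j : Int)))
            (k - pvTri t) (n - 1 - t) := by
  intro t
  induction t with
  | zero =>
    intro _
    simp only [pvTri, Nat.cast_zero, sub_zero]
    congr 1
    apply List.ext_getElem
    · simp
    · intro i h1 h2
      simp only [List.getElem_map, List.getElem_range]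
      have hlen : i < n.toNat := by simpa using h1
      rw [if_neg (by omega)]
  | succ t ihp =>
    intro ht
    push_cast at ht
    have hnpos : 0 < n := by omega
    have hmn' : m ≤ n := by omega
    rw [ihp (by omega)]
    have hm_toNat : ((m.toNat : Nat) : Int) = m := Int.toNat_of_nonneg hm0
    have htwiceM : 2 * pvTri m.toNat = m * (m + 1) := by
      have h2 := pvTri_twice m.toNat
      rw [hm_toNat] at h2
      linarith [h2, hP (by omega)]
    have htriM : pvTri m.toNat ≤ k := by linarith [htwiceM, hP (by omega)]
    have hstep : pvTri (t + 1) = pvTri t + ((t : Int) + 1) := by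
      simp [pvTri]
    have htri1 : pvTri (t + 1) ≤ pvTri m.toNat := pvTri_mono (by omega)
    rw [pvAdjust]
    rw [dif_neg (by omega : ¬ (n - 1 - (t : Int) < 0))]
    rw [if_neg (by omega : ¬ (k - pvTri t ≤ 0))]
    rw [if_pos (by omega : n - (n - 1 - (t : Int)) ≤ k - pvTri t)]
    have hpi : (((n - 1 - (t : Int)).toNat : Nat) : Int) = n - 1 - (t : Int) :=
      Int.toNat_of_nonneg (by omega)
    rw [set_map_range _ _ _ _ (by omega : (n - 1 - (t : Int)).toNat < n.toNat)]
    congr 1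
    · apply List.ext_getElem
      · simp
      · intro i h1 h2
        simp only [List.getElem_map, List.getElem_range]
        split_ifs <;> omega
    · omega
    · push_cast; ring

theorem pvBSearch_neg (k : Int) (hk : k < 0) : ∀ N : Nat, ∀ hi : Int, hi.toNat = N → 0 ≤ hi →
    pvBSearch k 0 hi = 0 := by
  intro N
  induction N using Nat.strong_induction_on with
  | _ N ih =>
    intro hi hN hhi
    rw [pvBSearch]
    by_cases hlt : (0 : Int) < hi
    · simp only [dif_pos hlt]
      have hmidb := PySem.Int.floordiv_two_mid_bounds (lo := 1) (hi := hi) (by omega)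
      have e : (1 : Int) + hi = 0 + hi + 1 := by ring
      rw [e] at hmidb
      set mid := PySem.Int.floordiv (0 + hi + 1) 2 with hmid
      have hev : Even (mid * (mid + 1)) := Int.even_mul_succ_self mid
      have hnn : 0 ≤ mid * (mid + 1) := by nlinarith [hmidb.1]
      have hc : ¬ PySem.Int.floordiv (mid * (mid + 1)) 2 ≤ k := by
        intro hcon
        have := (pvHalf_le _ _ hev).mp hcon
        omega
      rw [if_neg hc]
      exact ih (mid - 1).toNat (by omega) (mid - 1) rfl (by omega)
    · simp only [dif_neg hlt]

theorem pvHalf_even (y : Int) : PySem.Int.floordiv (2 * y) 2 = y := by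
  rw [PySem.Int.floordiv_eq_ediv_of_pos (by norm_num)]
  omega

theorem construct_intermediate_spec : Claim_equal_construct_intermediate := by
  unfold Claim_equal_construct_intermediate Spec_construct_intermediate
  intro n k _
  simp only [construct_intermediate, construct_intermediate_alt]
  set m := pvBSearch k 0 (max n 0) with hmdef
  have hhi0 : (0 : Int) ≤ max n 0 := le_max_right n 0
  have hfacts : 0 ≤ m ∧ m ≤ max n 0 ∧
      ((0 ≤ k → m * (m + 1) ≤ 2 * k ∧ (m + 1 ≤ max n 0 → ¬ ((m + 1) * (m + 2) ≤ 2 * k))) ∧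
       (k < 0 → m = 0)) := by
    rcases lt_or_ge k 0 with hk | hk
    · have hz := pvBSearch_neg k hk (max n 0).toNat (max n 0) (by omega) hhi0
      rw [← hmdef] at hz
      refine ⟨by omega, by omega, fun hk0 => absurd hk0 (by omega), fun _ => hz⟩
    · have hs := pvBSearch_spec k (max n 0 - 0).toNat 0 (max n 0) (by omega) hhi0 (by omega)
      exact ⟨hs.1, hs.2.1, fun _ => ⟨hs.2.2.1, hs.2.2.2⟩, fun hneg => absurd hk (by omega)⟩
  obtain ⟨hm0, hmhi, hkpos, hkneg⟩ := hfacts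
  have hm_toNat : ((m.toNat : Nat) : Int) = m := Int.toNat_of_nonneg hm0
  have htwiceM : 2 * pvTri m.toNat = m * (m + 1) := by
    have h2 := pvTri_twice m.toNat
    rw [hm_toNat] at h2
    linarith [h2]
  have hrtri : k - PySem.Int.floordiv (m * (m + 1)) 2 = k - pvTri m.toNat := by
    rw [← htwiceM, pvHalf_even]
  simp only [hrtri]
  have hidn : PySem.List.pyRange 1 (n + 1) 1 = (List.range n.toNat).map (fun (j : Nat) => (1 : Int) + (j : Int)) := by
    rw [PySem.List.pyRange_one]
    have : (n + 1 - 1).toNat = n.toNat := by omega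
    rw [this]
  have hB : ∀ g : Int → Int, (PySem.List.pyRange 0 n 1).map g
      = (List.range n.toNat).map (fun (j : Nat) => g ((j : Int))) := by
    intro g
    rw [PySem.List.pyRange_one]
    have : (n - 0).toNat = n.toNat := by omega
    rw [this, List.map_map]
    apply List.map_congr_left
    intro a _
    simp
  rw [hB]
  by_cases hk0 : k = 0
  · rw [if_pos hk0, hidn]
    have hm_z : m = 0 := by
      by_contra hne
      have h1 : 1 ≤ m := by omega
      have := (hkpos (by omega)).1
      nlinarith
    have htri0 : pvTri m.toNat = 0 := by rw [hm_z]; rfl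
    apply List.map_congr_left
    intro a ha
    simp only [List.mem_range] at ha
    rw [if_neg (by omega), if_neg (by omega)]
    omega
  · rw [if_neg hk0, hidn]
    rw [pvReach n k m hm0 hmhi ?side m.toNat (by omega)]
    case side =>
      intro h1
      rcases lt_or_ge k 0 with hkn | hkp
      · have := hkneg hkn; omega
      · exact (hkpos hkp).1
    rw [hm_toNat]
    rw [pvAdjust]
    by_cases hin : n - 1 - m < 0
    · rw [dif_pos hin]
      apply List.map_congr_left
      intro a ha
      simp only [List.mem_range] at ha
      rw [if_pos (by omega), if_pos (by omega)]
    · rw [dif_neg hin]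
      by_cases hr : k - pvTri m.toNat ≤ 0
      · rw [if_pos hr]
        apply List.map_congr_left
        intro a ha
        simp only [List.mem_range] at ha
        by_cases hc : n - m ≤ (a : Int)
        · rw [if_pos hc, if_pos hc]
        · rw [if_neg hc, if_neg hc, if_neg (by omega)]
          omega
      · rw [if_neg hr]
        have hnm : m < n := by omega
        have hkp : 0 ≤ k := by
          by_contra hkn
          have hz := hkneg (by omega)
          rw [hz] at hr
          simp [pvTri] at hr
          omega
        have hmax : ¬ ((m + 1) * (m + 2) ≤ 2 * k) :=
          (hkpos hkp).2 (by omega)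
        have htwice1 : 2 * pvTri (m.toNat + 1) = (m + 1) * (m + 2) := by
          have h2 := pvTri_twice (m.toNat + 1)
          push_cast at h2
          rw [hm_toNat] at h2
          linarith [h2]
        have hstep : pvTri (m.toNat + 1) = pvTri m.toNat + (m + 1) := by
          simp only [pvTri]; omega
        have hrlt : k - pvTri m.toNat < m + 1 := by omega
        rw [if_neg (by omega : ¬ (n - (n - 1 - m) ≤ k - pvTri m.toNat))]
        have hpi : (((n - 1 - m).toNat : Nat) : Int) = n - 1 - m := Int.toNat_of_nonneg (by omega)
        rw [set_map_range _ _ _ _ (by omega : (n - 1 - m).toNat < n.toNat)]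
        apply List.map_congr_left
        intro a ha
        simp only [List.mem_range] at ha
        by_cases hap : a = (n - 1 - m).toNat
        · rw [if_pos hap, if_neg (by omega), if_pos (by refine ⟨by omega, by omega⟩)]
          omega
        · rw [if_neg hap]
          by_cases hc : n - m ≤ (a : Int)
          · rw [if_pos (by omega), if_pos hc]
          · rw [if_neg (by omega), if_neg hc, if_neg (by omega)]
            omega
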